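-- pv_equiv track=rewrite | github.com/ahtif/Language-Modeling | cw1OLD.py | count_pos_neg
-- ===== SOURCE A (Python) =====
-- def count_pos_neg(positives, negatives, vocab):
--     pos_count = 0
--     neg_count = 0
--     for token, count in vocab.items():
--         if token in positives:
--             pos_count += count
--         if token in negatives:
--             neg_count += count
--     return pos_count, neg_count
-- ===== SOURCE B (Python) =====
-- def count_pos_neg(positives, negatives, vocab):
--     pos_count = sum(vocab.get(w, 0) for w in set(positives))
--     neg_count = sum(vocab.get(w, 0) for w in set(negatives))
--     return pos_count, neg_count
-- ===== Notes on version B (the rewrite author's own statement) =====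
-- stated objective: alternative
-- what changed: Instead of scanning the whole vocabulary with two membership branches, B iterates over the deduplicated positive/negative word sets and sums direct dict lookups vocab.get(w, 0).
import Mathlib
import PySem

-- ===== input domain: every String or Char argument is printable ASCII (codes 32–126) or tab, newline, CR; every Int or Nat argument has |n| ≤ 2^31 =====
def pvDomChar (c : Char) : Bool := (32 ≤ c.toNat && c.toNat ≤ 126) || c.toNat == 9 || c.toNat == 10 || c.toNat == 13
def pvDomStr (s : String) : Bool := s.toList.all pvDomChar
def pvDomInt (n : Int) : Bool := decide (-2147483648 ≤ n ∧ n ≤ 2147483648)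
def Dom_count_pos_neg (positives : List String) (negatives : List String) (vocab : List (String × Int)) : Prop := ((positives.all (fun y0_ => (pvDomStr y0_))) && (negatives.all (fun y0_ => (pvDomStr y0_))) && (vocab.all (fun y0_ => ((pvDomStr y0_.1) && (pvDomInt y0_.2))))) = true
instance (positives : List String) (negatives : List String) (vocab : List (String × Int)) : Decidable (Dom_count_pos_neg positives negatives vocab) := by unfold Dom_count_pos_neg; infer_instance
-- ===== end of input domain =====

-- B sums direct vocab lookups over the deduplicated positive/negative word sets instead of scanning the vocabulary with membership branches.


-- ===== PORT A =====
def count_pos_neg (positives : List String) (negatives : List String) (vocab : List (String × Int)) : Int × Int :=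
  vocab.foldl (fun (acc : Int × Int) tc =>
    let acc1 := if positives.contains tc.1 then (acc.1 + tc.2, acc.2) else acc
    if negatives.contains tc.1 then (acc1.1, acc1.2 + tc.2) else acc1) (0, 0)

-- ===== PORT B =====
-- vocab.get(w, 0): first match in the association list, default 0
def pvGetD0 (vocab : List (String × Int)) (w : String) : Int :=
  match vocab.find? (fun p => p.1 == w) with
  | some p => p.2
  | none => 0

def count_pos_neg_alt (positives : List String) (negatives : List String) (vocab : List (String × Int)) : Int × Int :=
  (((PySem.Set.ofList positives).map (fun w => pvGetD0 vocab w)).sum,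
   ((PySem.Set.ofList negatives).map (fun w => pvGetD0 vocab w)).sum)

-- ===== PRECONDITION & SPEC =====
-- Pre_ requires the vocab association list to have pairwise-distinct keys: it stands for a
-- Python dict, whose keys are always distinct, so no input the Python A accepts is excluded.
def Pre_count_pos_neg (positives : List String) (negatives : List String) (vocab : List (String × Int)) : Prop :=
  (vocab.map Prod.fst).Nodup
instance (positives : List String) (negatives : List String) (vocab : List (String × Int)) : Decidable (Pre_count_pos_neg positives negatives vocab) := by unfold Pre_count_pos_neg; infer_instance

def pvWitness_count_pos_neg : List String × List String × (List (String × Int)) :=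
  (["good", "nice"], ["bad"], [("good", 3), ("bad", 2), ("meh", 1)])

def Spec_count_pos_neg (positives : List String) (negatives : List String) (vocab : List (String × Int)) (out : Int × Int) : Prop := out = count_pos_neg_alt positives negatives vocab
instance (positives : List String) (negatives : List String) (vocab : List (String × Int)) (out : Int × Int) : Decidable (Spec_count_pos_neg positives negatives vocab out) := by unfold Spec_count_pos_neg; infer_instance

-- ===== CLAIM (what is proved, stated in full; the proofs are below) =====
def Claim_equal_count_pos_neg : Prop := ∀ (positives : List String) (negatives : List String) (vocab : List (String × Int)), Dom_count_pos_neg positives negatives vocab → Pre_count_pos_neg positives negatives vocab → Spec_count_pos_neg positives negatives vocab (count_pos_neg positives negatives vocab)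

-- ===== LEMMAS AND PROOFS =====

-- branch sum: what A adds to each component over the whole vocab
def pvSel (ws : List String) (vocab : List (String × Int)) : Int :=
  (vocab.map (fun tc => if ws.contains tc.1 then tc.2 else 0)).sum

theorem pvA_foldl (ps ns : List String) (vocab : List (String × Int)) (a b : Int) :
    vocab.foldl (fun (acc : Int × Int) tc =>
      let acc1 := if ps.contains tc.1 then (acc.1 + tc.2, acc.2) else acc
      if ns.contains tc.1 then (acc1.1, acc1.2 + tc.2) else acc1) (a, b)
      = (a + pvSel ps vocab, b + pvSel ns vocab) := by
  induction vocab generalizing a b with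
  | nil => simp [pvSel]
  | cons tc rest ih =>
    rw [List.foldl_cons]
    have hstep : (let acc1 := if ps.contains tc.1 then (((a : Int), (b : Int)).1 + tc.2, ((a : Int), (b : Int)).2) else ((a : Int), (b : Int));
        if ns.contains tc.1 then (acc1.1, acc1.2 + tc.2) else acc1)
        = (a + (if ps.contains tc.1 then tc.2 else 0),
           b + (if ns.contains tc.1 then tc.2 else 0)) := by
      by_cases hp : tc.1 ∈ ps <;> by_cases hn : tc.1 ∈ ns <;> simp [hp, hn]
    rw [hstep, ih]
    simp only [pvSel, List.map_cons, List.sum_cons, Prod.mk.injEq]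
    constructor <;> ring

theorem pvGetD0_eq_zero (vocab : List (String × Int)) (w : String)
    (h : w ∉ vocab.map Prod.fst) : pvGetD0 vocab w = 0 := by
  unfold pvGetD0
  have : vocab.find? (fun p => p.1 == w) = none := by
    rw [List.find?_eq_none]
    intro p hp
    simp only [beq_iff_eq]
    intro he
    exact h (he ▸ List.mem_map_of_mem hp)
  simp [this]

-- pulling one fresh vocab entry out of the B-side sum
theorem pvSum_ite (t : String) (c : Int) (g : String → Int) (hg : g t = 0) :
    ∀ (S : List String), S.Nodup →
    (S.map (fun w => if t == w then c else g w)).sum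
      = (if S.contains t then c else 0) + (S.map g).sum := by
  intro S hS
  induction S with
  | nil => simp
  | cons x rest ih =>
    have hrest := ih (List.Nodup.of_cons hS)
    by_cases hx : t = x
    · subst hx
      have hnot : t ∉ rest := (List.nodup_cons.mp hS).1
      have hmap : (rest.map (fun w => if t = w then c else g w)) = rest.map g := by
        apply List.map_congr_left
        intro w hw
        exact if_neg (fun (he : t = w) => hnot (he.symm ▸ hw))
      simp [hmap, hg]
    · have hbe : (t == x) = false := beq_eq_false_iff_ne.mpr hx
      have hco : (x :: rest).contains t = rest.contains t := by
        simp only [List.contains_cons, hbe, Bool.false_or]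
      simp only [List.map_cons, List.sum_cons, hbe, Bool.false_eq_true, if_false, hco, hrest]
      ring

theorem pvB_sum (S : List String) (hS : S.Nodup) (vocab : List (String × Int))
    (hv : (vocab.map Prod.fst).Nodup) :
    (S.map (fun w => pvGetD0 vocab w)).sum = pvSel S vocab := by
  induction vocab with
  | nil =>
    simp [pvSel, pvGetD0]
  | cons tc rest ih =>
    have hkey : tc.1 ∉ rest.map Prod.fst := (List.nodup_cons.mp hv).1
    have hrest := ih (List.Nodup.of_cons hv)
    have hmap : (S.map (fun w => pvGetD0 (tc :: rest) w))
        = S.map (fun w => if tc.1 == w then tc.2 else pvGetD0 rest w) := by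
      apply List.map_congr_left
      intro w _
      unfold pvGetD0
      simp only [List.find?_cons]
      by_cases h : tc.1 = w
      · simp [h]
      · have hbe : (tc.1 == w) = false := beq_eq_false_iff_ne.mpr h
        simp [hbe]
    rw [hmap, pvSum_ite tc.1 tc.2 _ (pvGetD0_eq_zero rest tc.1 hkey) S hS, hrest]
    simp [pvSel]

theorem pvSet_contains (xs : List String) (t : String) :
    List.contains (PySem.Set.ofList xs) t = xs.contains t := by
  simp [PySem.Set.mem_ofList]

theorem pvSel_ofList (ws : List String) (vocab : List (String × Int)) :
    pvSel (PySem.Set.ofList ws) vocab = pvSel ws vocab := by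
  unfold pvSel
  congr 1
  apply List.map_congr_left
  intro tc _
  rw [pvSet_contains]

-- ===== VERDICT (by name: the statement is the Claim_ definition above) =====
theorem count_pos_neg_spec : Claim_equal_count_pos_neg := by
  intro positives negatives vocab _ hpre
  unfold Spec_count_pos_neg count_pos_neg count_pos_neg_alt
  rw [pvA_foldl,
      pvB_sum (PySem.Set.ofList positives) (PySem.Set.nodup_ofList positives) vocab hpre,
      pvB_sum (PySem.Set.ofList negatives) (PySem.Set.nodup_ofList negatives) vocab hpre,
      pvSel_ofList, pvSel_ofList]
  simp
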